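-- pv_equiv track=rewrite | github.com/rahulbhattachan/EECS690-Project | 783-Text-Detection/analyze_outputs.py | find_word_with_most_longest_substrings
-- ===== SOURCE A (Python) =====
-- from collections import Counter
--
-- def find_word_with_most_longest_substrings(words):
--     """
--     Finds the word that contains the most of the longest substrings from the input list.
--
--     Args:
--         words (list): List of input strings.
--
--     Returns:
--         dict: Dictionary with 'longest_substrings' and 'matching_words' keys.
--     """
--     substrings = Counter()
--
--     # Generate all substrings and count their occurrences
--     for word in words:
--         for i in range(len(word)):
--             for j in range(i + 1, len(word) + 1):
--                 substrings[word[i:j]] += 1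
--
--     # Find the longest substrings
--     max_length = max(len(sub) for sub in substrings.keys())
--     longest_substrings = [sub for sub in substrings if len(sub) == max_length]
--
--     # Determine which words contain the most of the longest substrings
--     word_counts = Counter()
--     for word in words:
--         count = sum(1 for sub in longest_substrings if sub in word)
--         word_counts[word] = count
--
--     # Get words containing the most longest substrings with count > 2
--     matching_words = [word for word, count in word_counts.items() if count > 1]
--
--     return {
--         "longest_substrings": longest_substrings,
--         "matching_words": matching_words
--     }
-- ===== SOURCE B (Python) =====
-- def find_word_with_most_longest_substrings(words):
--     # The longest substrings occurring anywhere are exactly the words of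
--     # maximal length (each word is a substring of itself, and no substring
--     # is longer than its word), deduplicated in first-occurrence order.
--     # No word can contain two distinct substrings of that maximal length,
--     # so the 'count > 1' filter can never select a word: matching is empty.
--     m = max(len(w) for w in words)
--     longest = []
--     for w in words:
--         if len(w) == m and w not in longest:
--             longest.append(w)
--     return {
--         "longest_substrings": longest,
--         "matching_words": []
--     }
-- ===== Notes on version B (the rewrite author's own statement) =====
-- stated objective: faster
-- what changed: B never enumerates substrings: the longest substrings are provably just the distinct words of maximal length in first-occurrence order, and no word can contain more than one substring of maximal length, so matching_words is provably always empty; B computes the max word length and one dedup pass.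
import Mathlib
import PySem

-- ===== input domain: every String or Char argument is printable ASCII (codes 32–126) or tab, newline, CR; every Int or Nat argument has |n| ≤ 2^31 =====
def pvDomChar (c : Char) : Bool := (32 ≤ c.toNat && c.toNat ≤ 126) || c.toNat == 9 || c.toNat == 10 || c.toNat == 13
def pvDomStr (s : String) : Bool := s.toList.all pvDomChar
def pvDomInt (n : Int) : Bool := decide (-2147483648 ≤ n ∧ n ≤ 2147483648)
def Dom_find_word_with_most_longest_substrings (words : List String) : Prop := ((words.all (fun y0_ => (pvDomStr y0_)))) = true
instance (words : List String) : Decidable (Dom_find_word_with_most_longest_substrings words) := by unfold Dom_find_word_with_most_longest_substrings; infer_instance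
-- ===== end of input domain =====

-- B replaces A's full substring enumeration by one pass over the words: the longest
-- substrings are exactly the distinct words of maximal length, and matching_words is
-- provably always empty (objective: faster, asymptotically).

-- ===== PORT A =====
def find_word_with_most_longest_substrings (words : List String) : List (String × List String) :=
  let substrings : PySem.Dict String Int :=
    words.foldl (fun d word =>
      (PySem.List.pyRange 0 (PySem.Str.len word) 1).foldl (fun d i =>
        (PySem.List.pyRange (i + 1) (PySem.Str.len word + 1) 1).foldl (fun d j =>
          d.modify (PySem.Str.slice word (some i) (some j)) 0 (· + 1)) d) d)
      PySem.Dict.empty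
  match PySem.List.max? (substrings.keys.map (fun sub => PySem.Str.len sub)) (fun x => x) with
  | none => []   -- Python raises ValueError here (max() of no substrings); excluded by Pre_
  | some max_length =>
    let longest_substrings := substrings.keys.filter (fun sub => PySem.Str.len sub == max_length)
    let word_counts : PySem.Dict String Int :=
      words.foldl (fun d word =>
        d.insert word (longest_substrings.foldl
          (fun c sub => if PySem.Str.isIn sub word then c + 1 else c) 0)) PySem.Dict.empty
    let matching_words := (word_counts.items.filter (fun p => decide ((1 : Int) < p.2))).map (·.1)
    [("longest_substrings", longest_substrings), ("matching_words", matching_words)]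

-- ===== PORT B =====
def find_word_with_most_longest_substrings_alt (words : List String) : List (String × List String) :=
  match PySem.List.max? (words.map (fun w => PySem.Str.len w)) (fun x => x) with
  | none => []   -- Python raises ValueError here (max() over an empty list)
  | some m =>
    let longest := words.foldl (fun acc w =>
      if PySem.Str.len w == m && !(acc.contains w) then acc ++ [w] else acc) []
    [("longest_substrings", longest), ("matching_words", [])]

-- ===== PRECONDITION & SPEC =====
-- Pre_ excludes exactly the inputs where A raises ValueError (max() of an empty
-- sequence): the empty list and lists whose words are all empty.
def Pre_find_word_with_most_longest_substrings (words : List String) : Prop :=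
  ∃ w ∈ words, w ≠ ""
instance (words : List String) : Decidable (Pre_find_word_with_most_longest_substrings words) := by
  unfold Pre_find_word_with_most_longest_substrings; infer_instance
def pvWitness_find_word_with_most_longest_substrings : List String := ["ab", "c"]

def Spec_find_word_with_most_longest_substrings (words : List String) (out : List (String × List String)) : Prop := out = find_word_with_most_longest_substrings_alt words
instance (words : List String) (out : List (String × List String)) : Decidable (Spec_find_word_with_most_longest_substrings words out) := by unfold Spec_find_word_with_most_longest_substrings; infer_instance

-- ===== CLAIM (what is proved, stated in full; the proofs are below) =====
def Claim_equal_find_word_with_most_longest_substrings : Prop := ∀ (words : List String), Dom_find_word_with_most_longest_substrings words → Pre_find_word_with_most_longest_substrings words → Spec_find_word_with_most_longest_substrings words (find_word_with_most_longest_substrings words)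

-- ===== LEMMAS AND PROOFS =====

-- All substrings A generates for one word, in A's iteration order.
def pvSubs (w : String) : List String :=
  (PySem.List.pyRange 0 (PySem.Str.len w) 1).flatMap (fun i =>
    (PySem.List.pyRange (i + 1) (PySem.Str.len w + 1) 1).map (fun j =>
      PySem.Str.slice w (some i) (some j)))

theorem pv_keys_aux (w : String) (li : List Int) (d : PySem.Dict String Int) :
    (li.foldl (fun d i =>
        (PySem.List.pyRange (i + 1) (PySem.Str.len w + 1) 1).foldl (fun d j =>
          d.modify (PySem.Str.slice w (some i) (some j)) 0 (· + 1)) d) d).keys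
      = PySem.Set.update d.keys (li.flatMap (fun i =>
          (PySem.List.pyRange (i + 1) (PySem.Str.len w + 1) 1).map (fun j =>
            PySem.Str.slice w (some i) (some j)))) := by
  induction li generalizing d with
  | nil => simp [PySem.Set.update_nil]
  | cons x xs ih =>
    simp only [List.foldl_cons, List.flatMap_cons, PySem.Set.update_append, ih,
      PySem.Dict.keys_foldl_modify_key]

theorem pv_keys_all (words : List String) (d : PySem.Dict String Int) :
    (words.foldl (fun d word =>
      (PySem.List.pyRange 0 (PySem.Str.len word) 1).foldl (fun d i =>
        (PySem.List.pyRange (i + 1) (PySem.Str.len word + 1) 1).foldl (fun d j =>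
          d.modify (PySem.Str.slice word (some i) (some j)) 0 (· + 1)) d) d)
      d).keys = PySem.Set.update d.keys (words.flatMap pvSubs) := by
  induction words generalizing d with
  | nil => simp [PySem.Set.update_nil]
  | cons x xs ih =>
    simp only [List.foldl_cons, List.flatMap_cons, PySem.Set.update_append, ih,
      pv_keys_aux, pvSubs]

theorem pv_toList_slice_nonneg (w : String) {i j : Int} (hi : 0 ≤ i) (hj : 0 ≤ j) :
    (PySem.Str.slice w (some i) (some j)).toList
      = List.take (j.toNat - i.toNat) (List.drop i.toNat w.toList) := by
  rw [PySem.Str.toList_slice, PySem.Chars.slice_eq_listSlice, PySem.List.slice_toNat _ hi hj]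

theorem pv_slice_self (w : String) :
    PySem.Str.slice w (some 0) (some (PySem.Str.len w)) = w := by
  apply String.toList_inj.mp
  rw [pv_toList_slice_nonneg w le_rfl (by rw [PySem.Str.len_eq]; positivity)]
  simp [PySem.Str.len_eq]


theorem pv_mem_subs_infix {w sub : String} (h : sub ∈ pvSubs w) : sub.toList <:+: w.toList := by
  simp only [pvSubs, List.mem_flatMap, List.mem_map, PySem.List.mem_pyRange_one] at h
  obtain ⟨i, ⟨hi0, _⟩, j, ⟨hj1, _⟩, rfl⟩ := h
  rw [pv_toList_slice_nonneg w hi0 (by omega)]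
  rw [List.infix_iff_prefix_suffix]
  exact ⟨List.drop i.toNat w.toList, List.take_prefix _ _, List.drop_suffix _ _⟩

theorem pv_self_mem_subs {w : String} (h : w ≠ "") : w ∈ pvSubs w := by
  have hlen : 0 < w.toList.length := by
    cases hw : w.toList with
    | nil => exact absurd (String.toList_inj.mp (by simp [hw]) : w = "") h
    | cons a l => simp
  simp only [pvSubs, List.mem_flatMap, List.mem_map, PySem.List.mem_pyRange_one]
  refine ⟨0, ⟨le_rfl, by rw [PySem.Str.len_eq]; exact_mod_cast hlen⟩,
    PySem.Str.len w, ⟨by rw [PySem.Str.len_eq]; omega, by omega⟩, pv_slice_self w⟩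

theorem pv_len_slice (w : String) {i j : Int} (hi : 0 ≤ i) (hj : 0 ≤ j) :
    (PySem.Str.slice w (some i) (some j)).toList.length
      = min (j.toNat - i.toNat) (w.toList.length - i.toNat) := by
  rw [pv_toList_slice_nonneg w hi hj]
  simp [List.length_take, List.length_drop]

theorem pv_filter_subs (w : String) (M : Int) (h1 : 1 ≤ M) (hL : (w.toList.length : Int) ≤ M) :
    (pvSubs w).filter (fun sub => PySem.Str.len sub == M)
      = if (w.toList.length : Int) = M then [w] else [] := by
  have hlen : PySem.Str.len w = (w.toList.length : Int) := PySem.Str.len_eq w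
  rw [pvSubs, List.filter_flatMap]
  by_cases hM : (w.toList.length : Int) = M
  · -- L = M ≥ 1
    have hL0 : 0 < (w.toList.length : Int) := by omega
    rw [if_pos hM, PySem.List.pyRange_one_cons (by rw [hlen]; omega)]
    rw [List.flatMap_cons]
    have hrest : (PySem.List.pyRange (0 + 1) (PySem.Str.len w) 1).flatMap
        (fun i => List.filter (fun sub => PySem.Str.len sub == M)
          ((PySem.List.pyRange (i + 1) (PySem.Str.len w + 1) 1).map
            (fun j => PySem.Str.slice w (some i) (some j)))) = [] := by
      rw [List.flatMap_eq_nil_iff]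
      intro i hi
      rw [PySem.List.mem_pyRange_one] at hi
      rw [List.filter_eq_nil_iff]
      intro sub hsub
      rw [List.mem_map] at hsub
      obtain ⟨j, hj, rfl⟩ := hsub
      rw [PySem.List.mem_pyRange_one] at hj
      rw [beq_iff_eq, PySem.Str.len_eq, pv_len_slice w (by omega) (by omega)]
      rw [hlen] at hi hj
      omega
    rw [hrest, List.append_nil]
    -- the i = 0 chunk
    have hsplit : PySem.List.pyRange (0 + 1) (PySem.Str.len w + 1) 1
        = PySem.List.pyRange 1 (PySem.Str.len w) 1 ++ [PySem.Str.len w] := by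
      rw [zero_add, PySem.List.pyRange_one_succ_right (by rw [hlen]; omega)]
    rw [hsplit, List.map_append, List.filter_append]
    have hfirst : List.filter (fun sub => PySem.Str.len sub == M)
        ((PySem.List.pyRange 1 (PySem.Str.len w) 1).map
          (fun j => PySem.Str.slice w (some 0) (some j))) = [] := by
      rw [List.filter_eq_nil_iff]
      intro sub hsub
      rw [List.mem_map] at hsub
      obtain ⟨j, hj, rfl⟩ := hsub
      rw [PySem.List.mem_pyRange_one] at hj
      rw [beq_iff_eq, PySem.Str.len_eq, pv_len_slice w le_rfl (by omega)]
      rw [hlen] at hj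
      omega
    rw [hfirst, List.nil_append, List.map_singleton, pv_slice_self w]
    have hp : (PySem.Str.len w == M) = true := beq_iff_eq.mpr (by rw [hlen]; exact hM)
    simp only [List.filter_cons, List.filter_nil, hp]
    rfl
  · -- L < M: everything too short
    rw [if_neg hM, List.flatMap_eq_nil_iff]
    intro i hi
    rw [PySem.List.mem_pyRange_one] at hi
    rw [List.filter_eq_nil_iff]
    intro sub hsub
    rw [List.mem_map] at hsub
    obtain ⟨j, hj, rfl⟩ := hsub
    rw [PySem.List.mem_pyRange_one] at hj
    rw [beq_iff_eq, PySem.Str.len_eq (PySem.Str.slice w (some i) (some j)),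
      pv_len_slice w (i := i) (j := j) (by omega) (by omega)]
    rw [hlen] at hi hj
    omega

theorem pv_filter_add (p : String → Bool) (s : PySem.Set String) (x : String) :
    (PySem.Set.add s x).filter p
      = if p x then PySem.Set.add (s.filter p) x else s.filter p := by
  rw [PySem.Set.add_eq_ite, PySem.Set.add_eq_ite]
  by_cases hx : x ∈ s
  · rw [if_pos hx]
    by_cases hp : p x
    · rw [if_pos hp, if_pos (List.mem_filter.mpr ⟨hx, hp⟩)]
    · simp [hp]
  · rw [if_neg hx, List.filter_append]
    by_cases hp : p x
    · rw [if_pos hp, if_neg (fun h => hx (List.mem_filter.mp h).1)]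
      simp [List.filter, hp]
    · simp [List.filter, hp]

theorem pv_filter_foldl_add (p : String → Bool) (xs : List String) (s : PySem.Set String) :
    (xs.foldl PySem.Set.add s).filter p
      = (xs.filter p).foldl PySem.Set.add (s.filter p) := by
  induction xs generalizing s with
  | nil => rfl
  | cons x t ih =>
    rw [List.foldl_cons, ih, pv_filter_add]
    by_cases hp : p x
    · rw [if_pos hp, List.filter_cons_of_pos hp, List.foldl_cons]
    · rw [if_neg hp, List.filter_cons_of_neg hp]

theorem pv_filter_ofList (xs : List String) (p : String → Bool) :
    (PySem.Set.ofList xs).filter p = PySem.Set.ofList (xs.filter p) := by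
  rw [PySem.Set.ofList_eq_foldl, PySem.Set.ofList_eq_foldl, pv_filter_foldl_add]
  rfl

theorem pv_flatMap_ite (p : String → Bool) (l : List String) :
    l.flatMap (fun x => if p x then [x] else []) = l.filter p := by
  induction l with
  | nil => rfl
  | cons x t ih =>
    rw [List.flatMap_cons, ih]
    by_cases hp : p x
    · rw [if_pos hp, List.filter_cons_of_pos hp, List.singleton_append]
    · rw [if_neg hp, List.filter_cons_of_neg hp, List.nil_append]

theorem pv_nodup_len_le_one {l : List String} {v : String}
    (hnd : l.Nodup) (hall : ∀ x ∈ l, x = v) : l.length ≤ 1 := by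
  match l, hnd with
  | [], _ => simp
  | [x], _ => simp
  | x :: y :: t, hnd =>
    exfalso
    have hx := hall x (by simp)
    have hy := hall y (by simp)
    rw [List.nodup_cons] at hnd
    exact hnd.1 (by simp [hx, hy])

theorem pv_countP_le_one {l : List String} {p : String → Bool} {v : String}
    (hnd : l.Nodup) (h : ∀ x ∈ l, p x = true → x = v) : l.countP p ≤ 1 := by
  rw [List.countP_eq_length_filter]
  exact pv_nodup_len_le_one (hnd.filter p) (fun x hx =>
    h x (List.mem_filter.mp hx).1 (List.mem_filter.mp hx).2)

theorem pv_items_le (l : List String) (g : String → Int) (d : PySem.Dict String Int)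
    (hd : ∀ q ∈ d.items, q.2 ≤ 1) (hg : ∀ w ∈ l, g w ≤ 1) :
    ∀ q ∈ (l.foldl (fun d w => d.insert w (g w)) d).items, q.2 ≤ 1 := by
  induction l generalizing d with
  | nil => exact hd
  | cons x t ih =>
    rw [List.foldl_cons]
    refine ih _ ?_ (fun w hw => hg w (by simp [hw]))
    intro q hq
    rcases (PySem.Dict.mem_items_insert d x (g x) q).mp hq with h | h
    · rw [h]; exact hg x (by simp)
    · exact hd q h.1

-- ===== VERDICT (by name: the statement is the Claim_ definition above) =====
theorem find_word_with_most_longest_substrings_spec : Claim_equal_find_word_with_most_longest_substrings := by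
  intro words _ hpre
  obtain ⟨w0, hw0, hw0ne⟩ := hpre
  unfold Spec_find_word_with_most_longest_substrings
  unfold find_word_with_most_longest_substrings find_word_with_most_longest_substrings_alt
  have hw0len : 1 ≤ (w0.toList.length : Int) := by
    rcases hw : w0.toList with _ | ⟨a, l⟩
    · exact absurd (String.toList_inj.mp (by simp [hw])) hw0ne
    · simp
  -- B's max
  cases hB : PySem.List.max? (words.map (fun w => PySem.Str.len w)) (fun x => x) with
  | none =>
    rw [PySem.List.max?_eq_none_iff, List.map_eq_nil_iff] at hB
    subst hB; cases hw0
  | some m =>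
  have hmmax : ∀ w ∈ words, PySem.Str.len w ≤ m := by
    intro w hw
    exact PySem.List.max?_isMax hB _ (List.mem_map_of_mem hw)
  have h1m : 1 ≤ m := le_trans (by rw [← PySem.Str.len_eq] at hw0len; exact hw0len) (hmmax w0 hw0)
  obtain ⟨w1, hw1, hw1len⟩ := List.mem_map.mp (PySem.List.max?_mem hB)
  have hkeys := pv_keys_all words PySem.Dict.empty
  have hembed : ∀ w ∈ words, w ≠ "" → w ∈ PySem.Set.ofList (words.flatMap pvSubs) := by
    intro w hw hne
    exact (PySem.Set.mem_ofList _ _).mpr (List.mem_flatMap.mpr ⟨w, hw, pv_self_mem_subs hne⟩)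
  rw [PySem.Dict.keys_empty] at hkeys
  have hkeys2 : PySem.Set.update ([] : List String) (words.flatMap pvSubs) = PySem.Set.ofList (words.flatMap pvSubs) := rfl
  rw [hkeys2] at hkeys
  simp only [hkeys]
  cases hA : PySem.List.max? ((PySem.Set.ofList (words.flatMap pvSubs)).map (fun sub => PySem.Str.len sub)) (fun x => x) with
  | none =>
    exfalso
    rw [PySem.List.max?_eq_none_iff, List.map_eq_nil_iff] at hA
    have hm := hembed w0 hw0 hw0ne
    rw [hA] at hm
    cases hm
  | some m1 =>
  simp only [hA]
  have hm1 : m1 = m := by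
    refine le_antisymm ?_ ?_
    · obtain ⟨sub, hsubk, hsublen⟩ := List.mem_map.mp (PySem.List.max?_mem hA)
      obtain ⟨w, hw, hsub⟩ := List.mem_flatMap.mp ((PySem.Set.mem_ofList _ _).mp hsubk)
      have hinf := pv_mem_subs_infix hsub
      have hlenle : sub.toList.length ≤ w.toList.length := hinf.length_le
      have h3 := hmmax w hw
      rw [PySem.Str.len_eq] at hsublen h3
      omega
    · have hw1ne : w1 ≠ "" := by
        intro h
        rw [h] at hw1len
        have : (0 : Int) = m := by simpa [PySem.Str.len_eq] using hw1len
        omega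
      have hk : w1 ∈ PySem.Set.ofList (words.flatMap pvSubs) := hembed w1 hw1 hw1ne
      exact hw1len ▸ PySem.List.max?_isMax hA _ (List.mem_map_of_mem hk)
  rw [hm1]
  have hL : ∀ w ∈ words, (w.toList.length : Int) ≤ m := fun w hw => by
    rw [← PySem.Str.len_eq]; exact hmmax w hw
  have hFsubs : (words.flatMap pvSubs).filter (fun sub => PySem.Str.len sub == m)
      = words.filter (fun w => PySem.Str.len w == m) := by
    rw [List.filter_flatMap]
    rw [List.flatMap_congr (fun w hw => pv_filter_subs w m h1m (hL w hw))]
    rw [List.flatMap_congr (g := fun w => if (PySem.Str.len w == m) = true then [w] else [])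
      (fun w _ => by
        show (if (w.toList.length : Int) = m then [w] else [])
            = if (PySem.Str.len w == m) = true then [w] else []
        by_cases hc : (w.toList.length : Int) = m
        · rw [if_pos hc, if_pos (beq_iff_eq.mpr (by rw [PySem.Str.len_eq]; exact hc))]
        · rw [if_neg hc, if_neg (fun h => hc (by rw [beq_iff_eq, PySem.Str.len_eq] at h; exact h))])]
    exact pv_flatMap_ite _ _
  have hF : (PySem.Set.ofList (words.flatMap pvSubs)).filter (fun sub => PySem.Str.len sub == m)
      = PySem.Set.ofList (words.filter (fun w => PySem.Str.len w == m)) := by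
    rw [pv_filter_ofList, hFsubs]
  have hH : words.foldl (fun acc w =>
        if (PySem.Str.len w == m && !acc.contains w) = true then acc ++ [w] else acc) []
      = PySem.Set.ofList (words.filter (fun w => PySem.Str.len w == m)) := by
    have hstep : (fun (acc : List String) w =>
          if (PySem.Str.len w == m && !acc.contains w) = true then acc ++ [w] else acc)
        = fun acc w => if (PySem.Str.len w == m) = true then PySem.Set.add acc w else acc := by
      funext acc w
      rw [PySem.Set.add_eq_ite]
      cases hbeq : (PySem.Str.len w == m) with
      | false =>
        rw [Bool.false_and, if_neg (by simp), if_neg (by simp)]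
      | true =>
        rw [Bool.true_and, if_pos rfl]
        cases hc : acc.contains w with
        | false =>
          rw [if_pos (show (!false) = true by rfl), if_neg (fun hmem => by
            rw [List.contains_iff_mem.mpr hmem] at hc; cases hc)]
        | true =>
          rw [if_neg (by simp), if_pos (List.contains_iff_mem.mp hc)]
    rw [hstep, PySem.List.foldl_if_eq_foldl_filter, ← PySem.Set.ofList_eq_foldl]
  rw [hF, hH]
  have hcnt : ∀ w ∈ words,
      (PySem.Set.ofList (words.filter (fun w => PySem.Str.len w == m))).foldl
        (fun c sub => if PySem.Str.isIn sub w = true then c + 1 else c) (0 : Int) ≤ 1 := by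
    intro w hw
    have hfold := PySem.List.foldl_if_add_one (fun sub => PySem.Str.isIn sub w)
      (PySem.Set.ofList (words.filter (fun w => PySem.Str.len w == m))) (0 : Int)
    refine le_trans (le_of_eq hfold) ?_
    have hcp : (PySem.Set.ofList (words.filter (fun w => PySem.Str.len w == m))).countP
        (fun sub => PySem.Str.isIn sub w) ≤ 1 := by
      refine pv_countP_le_one (v := w) (PySem.Set.nodup_ofList _) ?_
      intro sub hsub hin
      have hsubw := (PySem.Set.mem_ofList _ _).mp hsub
      have hlenm : PySem.Str.len sub = m := beq_iff_eq.mp (List.mem_filter.mp hsubw).2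
      have hinf := (PySem.Str.isIn_iff_infix _ _).mp hin
      have hlenle : sub.toList.length ≤ w.toList.length := hinf.length_le
      have hwle : (w.toList.length : Int) ≤ m := hL w hw
      have heq : sub.toList.length = w.toList.length := by
        rw [PySem.Str.len_eq] at hlenm; omega
      exact String.toList_inj.mp (hinf.sublist.eq_of_length heq)
    omega
  have hval := pv_items_le words (fun word => List.foldl
      (fun c sub => if PySem.Str.isIn sub word = true then c + 1 else c) 0
      (PySem.Set.ofList (List.filter (fun w => PySem.Str.len w == m) words)))
      PySem.Dict.empty (fun q hq => nomatch hq) hcnt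
  have hmatch : (List.filter (fun p => decide ((1:Int) < p.2))
      ((words.foldl (fun d word =>
        d.insert word (List.foldl
          (fun c sub => if PySem.Str.isIn sub word = true then c + 1 else c) 0
          (PySem.Set.ofList (words.filter (fun w => PySem.Str.len w == m)))))
        PySem.Dict.empty).items)) = [] := by
    rw [List.filter_eq_nil_iff]
    intro q hq
    have := hval q hq
    simp only [decide_eq_true_eq]
    omega
  rw [hmatch, List.map_nil]
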